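-- pv_equiv track=rewrite | github.com/Swixixle/Sweeps_Intel | src/intel/infra_denylist.py | filter_signal_mx_hosts
-- ===== SOURCE A (Python) =====
-- NOISE_MX_SUFFIXES: frozenset[str] = frozenset({
--     "google.com",
--     "googlemail.com",
--     "outlook.com",
--     "mail.protection.outlook.com",
-- })
--
-- def _suffix_matches(host: str, suffix: str) -> bool:
--     return host == suffix or host.endswith("." + suffix)
--
-- def is_noise_mx(host: str) -> bool:
--     """Return True if this MX host matches any denylist entry."""
--     host_lower = (host or "").lower().strip().rstrip(".")
--     if not host_lower:
--         return False
--     for suffix in NOISE_MX_SUFFIXES: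
--         if _suffix_matches(host_lower, suffix):
--             return True
--     return False
--
-- def filter_signal_mx_hosts(mx_records: list[dict]) -> list[str]:
--     """Extract MX hostnames, filter out noise, drop the RFC 7505 null MX (host='.')."""
--     out = []
--     for rec in mx_records or []:
--         host = (rec.get("host") or "").strip()
--         if not host or host == ".":
--             continue
--         if is_noise_mx(host):
--             continue
--         out.append(host)
--     return out
-- ===== SOURCE B (Python) =====
-- NOISE_MX_SUFFIXES: frozenset[str] = frozenset({
--     "google.com",
--     "googlemail.com",
--     "outlook.com",
--     "mail.protection.outlook.com",
-- })
--
-- def _is_noise_mx(host: str) -> bool: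
--     """Noise iff the set of dot-boundary suffixes of the normalized host
--     meets the denylist (replaces the per-suffix endswith scan)."""
--     hl = host.lower().strip().rstrip(".")
--     suffixes = {hl}
--     for i, ch in enumerate(hl):
--         if ch == ".":
--             suffixes.add(hl[i + 1:])
--     return not suffixes.isdisjoint(NOISE_MX_SUFFIXES)
--
-- def filter_signal_mx_hosts(mx_records: list[dict]) -> list[str]:
--     hosts = [(rec.get("host") or "").strip() for rec in (mx_records or [])]
--     return [h for h in hosts if h and h != "." and not _is_noise_mx(h)]
-- ===== Notes on version B (the rewrite author's own statement) =====
-- stated objective: alternative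
-- what changed: The noise test now builds the set of dot-boundary suffixes of the normalized host once and intersects it with the denylist set, instead of scanning the denylist with a per-entry endswith check; the outer loop becomes a map + filter comprehension.
import Mathlib
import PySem

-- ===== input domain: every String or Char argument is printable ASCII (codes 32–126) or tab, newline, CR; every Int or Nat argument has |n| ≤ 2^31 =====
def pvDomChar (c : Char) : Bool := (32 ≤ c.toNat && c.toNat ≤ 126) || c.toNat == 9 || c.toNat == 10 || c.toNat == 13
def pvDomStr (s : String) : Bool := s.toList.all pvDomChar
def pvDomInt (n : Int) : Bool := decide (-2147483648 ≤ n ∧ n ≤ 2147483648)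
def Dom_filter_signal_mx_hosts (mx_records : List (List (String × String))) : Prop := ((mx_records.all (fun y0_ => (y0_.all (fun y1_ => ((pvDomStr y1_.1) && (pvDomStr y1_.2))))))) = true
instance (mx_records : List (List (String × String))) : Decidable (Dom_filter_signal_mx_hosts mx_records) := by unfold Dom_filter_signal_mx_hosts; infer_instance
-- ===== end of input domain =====

-- B replaces A's per-denylist-entry endswith scan by building the set of dot-boundary
-- suffixes of the normalized host once and intersecting it with the denylist set
-- (objective: alternative algorithm; return value only, neither version mutates its input).

-- .rstrip(".") ported by hand (exact: removes exactly the trailing '.' characters); shared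
-- by both ports because both Pythons contain the same .rstrip(".") call.
def pvRstripDot (cs : List Char) : List Char := (cs.reverse.dropWhile (fun c => c == '.')).reverse

-- ===== PORT A =====
-- frozenset NOISE_MX_SUFFIXES (distinct literals, held at the List Char level)
def pvNoiseA : PySem.Set (List Char) :=
  PySem.Set.ofList ["google.com".toList, "googlemail.com".toList,
                    "outlook.com".toList, "mail.protection.outlook.com".toList]

def pv_suffix_matches (host suffix : List Char) : Bool :=
  host == suffix || PySem.Chars.endswith host ('.' :: suffix)

-- the loop 'for suffix in frozenset: if match: return True' is an any over the set
-- (the result is order-independent, so the frozenset iteration order does not matter)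
def pv_is_noise_mx (host : String) : Bool :=
  let host_lower := pvRstripDot (PySem.Chars.strip (PySem.Chars.lower host.toList))
  if host_lower.isEmpty then false
  else pvNoiseA.any (fun suffix => pv_suffix_matches host_lower suffix)

def filter_signal_mx_hosts (mx_records : List (List (String × String))) : List String :=
  mx_records.foldl (fun out rec =>
    -- host = (rec.get("host") or "").strip(); a missing key and a stored "" both give ""
    let host := PySem.Str.strip (PySem.Dict.getD (PySem.Dict.ofList rec) "host" "")
    if host == "" || host == "." then out
    else if pv_is_noise_mx host then out
    else out ++ [host]) []

-- ===== PORT B =====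
def pvNoiseB : PySem.Set (List Char) :=
  PySem.Set.ofList ["google.com".toList, "googlemail.com".toList,
                    "outlook.com".toList, "mail.protection.outlook.com".toList]

def alt_is_noise_mx (host : String) : Bool :=
  let hl := pvRstripDot (PySem.Chars.strip (PySem.Chars.lower host.toList))
  -- suffixes = {hl}; for i, ch in enumerate(hl): if ch == ".": suffixes.add(hl[i+1:])
  let suffixes := (PySem.List.enumerate hl 0).foldl
    (fun s p => if p.2 == '.' then PySem.Set.add s (PySem.Chars.slice hl (some (p.1 + 1)) none) else s)
    (PySem.Set.ofList [hl])
  !(PySem.Set.isdisjoint suffixes pvNoiseB)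

def filter_signal_mx_hosts_alt (mx_records : List (List (String × String))) : List String :=
  let hosts := mx_records.map (fun rec => PySem.Str.strip (PySem.Dict.getD (PySem.Dict.ofList rec) "host" ""))
  hosts.filter (fun h => !(h == "") && !(h == ".") && !alt_is_noise_mx h)

-- ===== PRECONDITION & SPEC =====
def Spec_filter_signal_mx_hosts (mx_records : List (List (String × String))) (out : List String) : Prop := out = filter_signal_mx_hosts_alt mx_records
instance (mx_records : List (List (String × String))) (out : List String) : Decidable (Spec_filter_signal_mx_hosts mx_records out) := by unfold Spec_filter_signal_mx_hosts; infer_instance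

-- ===== CLAIM (what is proved, stated in full; the proofs are below) =====
def Claim_equal_filter_signal_mx_hosts : Prop := ∀ (mx_records : List (List (String × String))), Dom_filter_signal_mx_hosts mx_records → Spec_filter_signal_mx_hosts mx_records (filter_signal_mx_hosts mx_records)

-- ===== LEMMAS AND PROOFS =====

-- a char list ends with '.'++s iff s is the tail after some '.' in it
theorem pv_dot_suffix_iff (hl s : List Char) :
    ('.' :: s) <:+ hl ↔ ∃ k, ∃ _ : k < hl.length, hl[k] = '.' ∧ s = hl.drop (k + 1) := by
  constructor
  · rintro ⟨t, ht⟩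
    have hlen : t.length < hl.length := by subst ht; simp
    refine ⟨t.length, hlen, ?_, ?_⟩
    · have h2 : hl[t.length]? = some '.' := by rw [← ht]; simp
      simpa [List.getElem?_eq_getElem hlen] using h2
    · have := congrArg (List.drop (t.length + 1)) ht
      simpa using this
  · rintro ⟨k, hk, hdot, hs⟩
    have hdrop : hl.drop k = hl[k] :: hl.drop (k + 1) := List.drop_eq_getElem_cons hk
    rw [hs, ← hdot, ← hdrop]
    exact List.drop_suffix k hl

-- membership through B's suffix-collecting foldl, for a general conditional add loop
theorem pv_mem_foldl_add {α : Type} [BEq α] [LawfulBEq α]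
    (l : List (Int × Char)) (f : Int × Char → α) (init : PySem.Set α) (x : α) :
    x ∈ l.foldl (fun s p => if p.2 == '.' then PySem.Set.add s (f p) else s) init ↔
      x ∈ init ∨ ∃ p ∈ l, p.2 = '.' ∧ x = f p := by
  induction l generalizing init with
  | nil => simp
  | cons p l ih =>
    simp only [List.foldl_cons]
    by_cases hp : p.2 = '.'
    · rw [if_pos (by simp [hp]), ih]
      simp only [List.mem_cons, PySem.Set.mem_add]
      constructor
      · rintro (⟨h|h⟩|⟨q,hq,hd,hx⟩)
        · exact Or.inl h
        · exact Or.inr ⟨p, Or.inl rfl, hp, h⟩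
        · exact Or.inr ⟨q, Or.inr hq, hd, hx⟩
      · rintro (h|⟨q,hq|hq,hd,hx⟩)
        · exact Or.inl (Or.inl h)
        · exact Or.inl (Or.inr (by rw [hx, hq]))
        · exact Or.inr ⟨q, hq, hd, hx⟩
    · rw [if_neg (by simp [hp]), ih]
      simp only [List.mem_cons]
      constructor
      · rintro (h|⟨q,hq,hd,hx⟩)
        · exact Or.inl h
        · exact Or.inr ⟨q, Or.inr hq, hd, hx⟩
      · rintro (h|⟨q,hq|hq,hd,hx⟩)
        · exact Or.inl h
        · exact absurd (hq ▸ hd) hp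
        · exact Or.inr ⟨q, hq, hd, hx⟩

-- the set built by B's loop holds exactly hl and its dot-boundary suffixes
theorem pv_mem_suffixes (hl x : List Char) :
    x ∈ (PySem.List.enumerate hl 0).foldl
        (fun s p => if p.2 == '.' then PySem.Set.add s (PySem.Chars.slice hl (some (p.1 + 1)) none) else s)
        (PySem.Set.ofList [hl]) ↔ x = hl ∨ ('.' :: x) <:+ hl := by
  rw [pv_mem_foldl_add, pv_dot_suffix_iff]
  constructor
  · rintro (h | ⟨p, hp, hdot, hx⟩)
    · left; simpa [PySem.Set.mem_ofList] using h
    · right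
      rcases (PySem.List.mem_enumerate_iff hl 0 p).1 hp with ⟨k, hk, rfl⟩
      refine ⟨k, hk, by simpa using hdot, ?_⟩
      have hcast : ((0 : Int) + (k : Int) + 1) = ((k + 1 : Nat) : Int) := by push_cast; ring
      simp only at hx
      rw [hx, hcast]
      simp only [PySem.Chars.slice_eq_listSlice]
      exact PySem.List.slice_from_natCast hl (k+1)
  · rintro (rfl | ⟨k, hk, hdot, hx⟩)
    · left; simp [PySem.Set.mem_ofList]
    · right
      refine ⟨((0 : Int) + (k : Int), hl[k]), (PySem.List.mem_enumerate_iff hl 0 _).2 ⟨k, hk, rfl⟩, hdot, ?_⟩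
      have hcast : ((0 : Int) + (k : Int) + 1) = ((k + 1 : Nat) : Int) := by push_cast; ring
      simp only [hcast]
      rw [hx]
      simp only [PySem.Chars.slice_eq_listSlice]
      exact (PySem.List.slice_from_natCast hl (k+1)).symm

theorem pv_noiseA_ne_nil : ∀ x ∈ pvNoiseA, x ≠ [] := by decide

-- the two noise tests agree on every host
theorem pv_noise_eq (host : String) : pv_is_noise_mx host = alt_is_noise_mx host := by
  unfold pv_is_noise_mx alt_is_noise_mx
  set hl := pvRstripDot (PySem.Chars.strip (PySem.Chars.lower host.toList)) with hhl
  clear_value hl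
  have hBA : pvNoiseB = pvNoiseA := rfl
  rw [Bool.eq_iff_iff, Bool.not_eq_true']
  rw [← Bool.not_eq_true (PySem.Set.isdisjoint _ _), PySem.Set.isdisjoint_iff]
  push Not
  by_cases hE : hl.isEmpty
  · have hnil : hl = [] := by simpa using hE
    subst hnil
    simp only [List.isEmpty_nil, if_true]
    constructor
    · intro h; exact (Bool.false_ne_true h).elim
    · rintro ⟨x, hx, hxB⟩
      rcases (pv_mem_suffixes _ _).1 hx with rfl | ⟨t, ht⟩
      · exact absurd rfl (pv_noiseA_ne_nil _ (hBA ▸ hxB))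
      · exact absurd (congrArg List.length ht) (by simp)
  · rw [if_neg (by simpa using hE)]
    constructor
    · intro h
      rcases List.any_eq_true.1 h with ⟨s, hs, hmatch⟩
      have hm : hl = s ∨ ('.' :: s) <:+ hl := by
        simpa [pv_suffix_matches, PySem.Chars.endswith_iff] using hmatch
      rcases hm with heq | hend
      · exact ⟨s, (pv_mem_suffixes _ _).2 (Or.inl heq.symm), hBA ▸ hs⟩
      · exact ⟨s, (pv_mem_suffixes _ _).2 (Or.inr hend), hBA ▸ hs⟩
    · rintro ⟨x, hx, hxB⟩
      rcases (pv_mem_suffixes _ _).1 hx with rfl | hsuf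
      · exact List.any_eq_true.2 ⟨_, hBA ▸ hxB, by simp [pv_suffix_matches]⟩
      · exact List.any_eq_true.2 ⟨x, hBA ▸ hxB, by
          simp [pv_suffix_matches, PySem.Chars.endswith_iff, hsuf]⟩

-- A's accumulating loop equals B's map-then-filter
theorem pv_outer (l : List (List (String × String))) (acc : List String) :
    l.foldl (fun out rec =>
      let host := PySem.Str.strip (PySem.Dict.getD (PySem.Dict.ofList rec) "host" "")
      if host == "" || host == "." then out
      else if pv_is_noise_mx host then out
      else out ++ [host]) acc
    = acc ++ (l.map (fun rec => PySem.Str.strip (PySem.Dict.getD (PySem.Dict.ofList rec) "host" ""))).filter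
        (fun h => !(h == "") && !(h == ".") && !alt_is_noise_mx h) := by
  induction l generalizing acc with
  | nil => simp
  | cons rec l ih =>
    simp only [List.foldl_cons, List.map_cons, List.filter_cons]
    rw [ih]
    set h := PySem.Str.strip (PySem.Dict.getD (PySem.Dict.ofList rec) "host" "") with hh
    rw [← pv_noise_eq h]
    cases h1 : (h == "") <;> cases h2 : (h == ".") <;> cases h3 : pv_is_noise_mx h <;>
      simp [h1, h2, h3]

-- ===== VERDICT (by name: the statement is the Claim_ definition above) =====
theorem filter_signal_mx_hosts_spec : Claim_equal_filter_signal_mx_hosts := by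
  intro mx _
  unfold Spec_filter_signal_mx_hosts filter_signal_mx_hosts filter_signal_mx_hosts_alt
  simpa using pv_outer mx []
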